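-- pv_equiv track=rewrite | github.com/guilhermehenriquesantos/api-paises | paises.py | retornar_linguagens
-- ===== SOURCE A (Python) =====
-- def retornar_linguagens(lista):
--     linguagensOficiais = []
--     for pais in lista:
--         for chave, valor in pais.items():
--             if (chave == 'languages'):
--                 for valorNomeLinguagem in valor.values():
--                     linguagensOficiais.append(valorNomeLinguagem)
--     linguagensOficiais = retirar_repetidos_lista(linguagensOficiais)
--     return sorted(linguagensOficiais)
--
-- def retirar_repetidos_lista(lista):
--     listaSemRepeticao = []
--     for elemento in lista:
--         if (elemento not in listaSemRepeticao):
--             listaSemRepeticao.append(elemento)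
--     return listaSemRepeticao
-- ===== SOURCE B (Python) =====
-- def retornar_linguagens(lista):
--     flat = []
--     for pais in lista:
--         for chave, valor in pais.items():
--             if chave == 'languages':
--                 flat.extend(valor.values())
--     flat.sort()
--     resultado = []
--     for x in flat:
--         if not resultado or resultado[-1] != x:
--             resultado.append(x)
--     return resultado
-- ===== Notes on version B (the rewrite author's own statement) =====
-- stated objective: alternative
-- what changed: B collects the same flat list of language names but replaces A's quadratic membership-test dedup followed by a sort with a single sort followed by a linear adjacency scan that keeps an element only when it differs from the last one kept.
import Mathlib
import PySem

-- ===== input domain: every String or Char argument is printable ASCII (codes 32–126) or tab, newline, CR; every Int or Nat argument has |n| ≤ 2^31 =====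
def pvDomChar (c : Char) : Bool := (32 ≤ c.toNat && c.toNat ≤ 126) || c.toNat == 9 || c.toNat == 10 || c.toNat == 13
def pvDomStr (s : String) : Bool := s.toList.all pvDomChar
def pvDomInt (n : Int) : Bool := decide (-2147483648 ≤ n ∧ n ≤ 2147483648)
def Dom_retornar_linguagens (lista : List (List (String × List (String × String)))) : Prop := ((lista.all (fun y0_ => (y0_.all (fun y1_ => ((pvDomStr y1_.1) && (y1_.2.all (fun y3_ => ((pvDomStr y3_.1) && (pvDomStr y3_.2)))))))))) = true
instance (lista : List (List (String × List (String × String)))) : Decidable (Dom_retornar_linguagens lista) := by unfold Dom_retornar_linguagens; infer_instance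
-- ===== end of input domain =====

-- B replaces A's O(n^2) membership-test dedup + final sort by sort-first then one adjacency scan (alternative decomposition).

-- ===== PORT A =====
-- retirar_repetidos_lista: membership-test dedup, first occurrences kept
def pvRetirarRepetidos (lista : List String) : List String :=
  lista.foldl (fun acc e => if e ∈ acc then acc else acc ++ [e]) []

def retornar_linguagens (lista : List (List (String × List (String × String)))) : List String :=
  -- the nested append loop over pais.items() / valor.values(), then retirar_repetidos, then sorted
  PySem.List.sorted (pvRetirarRepetidos (lista.foldl (fun acc pais =>
    pais.foldl (fun acc2 cv =>
      if cv.1 = "languages" then cv.2.foldl (fun a3 v => a3 ++ [v.2]) acc2 else acc2) acc) []))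
    (fun x => x) false

-- ===== PORT B =====
-- collection loop: flat.extend(valor.values())
def pvColetar (lista : List (List (String × List (String × String)))) : List String :=
  lista.foldl (fun flat pais =>
    pais.foldl (fun f2 cv => if cv.1 = "languages" then f2 ++ cv.2.map Prod.snd else f2) flat) []

def retornar_linguagens_alt (lista : List (List (String × List (String × String)))) : List String :=
  -- sort once, then adjacency scan: 'if not resultado or resultado[-1] != x'
  -- (resultado[-1] of a nonempty list = getLast, exact since it is only read when resultado ≠ [])
  (PySem.List.sorted (pvColetar lista) (fun x => x) false).foldl
    (fun res x => if res = [] ∨ res.getLast? ≠ some x then res ++ [x] else res) []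

-- ===== PRECONDITION & SPEC =====
def Spec_retornar_linguagens (lista : List (List (String × List (String × String)))) (out : List String) : Prop := out = retornar_linguagens_alt lista
instance (lista : List (List (String × List (String × String)))) (out : List String) : Decidable (Spec_retornar_linguagens lista out) := by unfold Spec_retornar_linguagens; infer_instance

-- ===== CLAIM (what is proved, stated in full; the proofs are below) =====
def Claim_equal_retornar_linguagens : Prop := ∀ (lista : List (List (String × List (String × String)))), Dom_retornar_linguagens lista → Spec_retornar_linguagens lista (retornar_linguagens lista)

-- ===== LEMMAS AND PROOFS =====

-- every element of a strictly increasing list is ≤ its last element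
theorem pv_le_getLast_of_pairwise_lt {l : List String} {a m : String}
    (h : l.Pairwise (· < ·)) (ha : a ∈ l) (hm : l.getLast? = some m) : a ≤ m := by
  induction l with
  | nil => simp at ha
  | cons b t ih =>
    rcases List.pairwise_cons.mp h with ⟨hb, ht⟩
    cases t with
    | nil =>
      simp at ha hm
      subst ha; subst hm; exact le_refl _
    | cons c u =>
      rw [List.getLast?_cons_cons] at hm
      rcases List.mem_cons.mp ha with rfl | ha
      · exact le_of_lt (hb m (List.mem_of_getLast? hm))
      · exact ih ht ha hm

-- invariant of the adjacency scan on a sorted input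
theorem pv_adj_spec (l : List String) (acc : List String)
    (hl : l.Pairwise (· ≤ ·)) (hacc : acc.Pairwise (· < ·))
    (hle : ∀ a ∈ acc, ∀ b ∈ l, a ≤ b) :
    (l.foldl (fun res x => if res = [] ∨ res.getLast? ≠ some x then res ++ [x] else res) acc).Pairwise (· < ·)
    ∧ ∀ x, x ∈ l.foldl (fun res x => if res = [] ∨ res.getLast? ≠ some x then res ++ [x] else res) acc ↔ x ∈ acc ∨ x ∈ l := by
  induction l generalizing acc with
  | nil => exact ⟨hacc, by simp⟩
  | cons x t ih =>
    rcases List.pairwise_cons.mp hl with ⟨hx, ht⟩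
    simp only [List.foldl_cons]
    by_cases hg : acc = [] ∨ acc.getLast? ≠ some x
    · rw [if_pos hg]
      have hltx : ∀ a ∈ acc, a < x := by
        intro a hamem
        rcases hg with hnil | hlast
        · subst hnil; simp at hamem
        · obtain ⟨m, hm⟩ := Option.isSome_iff_exists.mp
            ((List.getLast?_isSome (l := acc)).mpr (fun hn => by simp [hn] at hamem))
          have ham : a ≤ m := pv_le_getLast_of_pairwise_lt hacc hamem hm
          have hmx : m ≤ x := hle m (List.mem_of_getLast? hm) x (List.mem_cons_self ..)
          have : m ≠ x := by rintro rfl; exact hlast hm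
          exact lt_of_le_of_lt ham (lt_of_le_of_ne hmx this)
      have hacc' : (acc ++ [x]).Pairwise (· < ·) := by
        rw [List.pairwise_append]
        exact ⟨hacc, by simp, by simpa using hltx⟩
      have hle' : ∀ a ∈ acc ++ [x], ∀ b ∈ t, a ≤ b := by
        intro a hamem b hbmem
        rcases List.mem_append.mp hamem with h1 | h1
        · exact hle a h1 b (List.mem_cons_of_mem _ hbmem)
        · simp at h1; subst h1; exact hx b hbmem
      obtain ⟨hp, hm⟩ := ih (acc ++ [x]) ht hacc' hle'
      refine ⟨hp, fun y => ?_⟩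
      rw [hm y]; simp; tauto
    · rw [if_neg hg]
      push Not at hg
      have hxin : x ∈ acc := List.mem_of_getLast? hg.2
      have hle' : ∀ a ∈ acc, ∀ b ∈ t, a ≤ b :=
        fun a ha b hb => hle a ha b (List.mem_cons_of_mem _ hb)
      obtain ⟨hp, hm⟩ := ih acc ht hacc hle'
      refine ⟨hp, fun y => ?_⟩
      rw [hm y]; simp; constructor
      · tauto
      · rintro (h | rfl | h) <;> tauto

-- the two collection loops build the same flat list
theorem pv_coletar_eq (lista : List (List (String × List (String × String)))) :
    (lista.foldl (fun acc pais =>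
      pais.foldl (fun acc2 cv =>
        if cv.1 = "languages" then cv.2.foldl (fun a3 v => a3 ++ [v.2]) acc2 else acc2) acc) [])
    = pvColetar lista := by
  unfold pvColetar
  apply PySem.List.foldl_congr_mem
  intro acc pais _
  apply PySem.List.foldl_congr_mem
  intro acc2 cv _
  by_cases h : cv.1 = "languages"
  · simp only [if_pos h]
    exact PySem.List.foldl_append_singleton_eq_map (f := Prod.snd) (l := cv.2) acc2
  · simp [h]

-- A's hand-written dedup is set(xs) in first-occurrence order
theorem pv_retirar_eq_ofList (l : List String) : pvRetirarRepetidos l = PySem.Set.ofList l := by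
  unfold pvRetirarRepetidos
  rw [PySem.Set.ofList_eq_foldl]
  apply PySem.List.foldl_congr_mem
  intro acc e _
  simp [PySem.Set.add, PySem.Set.contains]

-- ===== VERDICT (by name: the statement is the Claim_ definition above) =====
theorem retornar_linguagens_spec : Claim_equal_retornar_linguagens := by
  unfold Claim_equal_retornar_linguagens
  intro lista _
  unfold Spec_retornar_linguagens retornar_linguagens retornar_linguagens_alt
  rw [pv_coletar_eq, pv_retirar_eq_ofList]
  have hsorted : (PySem.List.sorted (pvColetar lista) (fun x => x) false).Pairwise (· ≤ ·) := by
    simpa using PySem.List.sorted_pairwise (xs := pvColetar lista) (key := fun x => x)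
  obtain ⟨hpw, hmem⟩ := pv_adj_spec (PySem.List.sorted (pvColetar lista) (fun x => x) false) []
    hsorted (by simp) (by simp)
  refine PySem.List.sorted_eq_of_perm_of_pairwise_lt _ _ _ ?_ hpw
  rw [List.perm_ext_iff_of_nodup (hpw.imp (fun h => ne_of_lt h)) (PySem.Set.nodup_ofList (pvColetar lista))]
  intro y
  rw [hmem y]
  simp [PySem.List.mem_sorted, PySem.Set.mem_ofList]
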